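-- pv_equiv track=rewrite | github.com/Shqet/Surprize_v4.0 | app/ui/main_window.py | _build_camera_warning_text
-- ===== SOURCE A (Python) =====
-- def _build_camera_warning_text(warnings: list[object]) -> str:
--     keys = {str(x) for x in warnings}
--     missing_visible = "video_visible_not_ready" in keys
--     missing_thermal = "video_thermal_not_ready" in keys
--     if not missing_visible and not missing_thermal:
--         return ""
--
--     if missing_visible and missing_thermal:
--         cams = "видимая и тепловая камеры не подключены"
--     elif missing_visible:
--         cams = "видимая камера не подключена"
--     else:
--         cams = "тепловая камера не подключена"
--
--     return (
--         f"Внимание: {cams}.\n"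
--         "Испытание можно выполнить, но результаты будут без видео."
--     )
-- ===== SOURCE B (Python) =====
-- def _build_camera_warning_text(warnings: list[object]) -> str:
--     keys = [str(x) for x in warnings]
--     names = []
--     if "video_visible_not_ready" in keys:
--         names.append("видимая")
--     if "video_thermal_not_ready" in keys:
--         names.append("тепловая")
--     if not names:
--         return ""
--     suffix = " камера не подключена" if len(names) == 1 else " камеры не подключены"
--     cams = " и ".join(names) + suffix
--     return (
--         f"Внимание: {cams}.\n"
--         "Испытание можно выполнить, но результаты будут без видео."
--     )
-- ===== Notes on version B (the rewrite author's own statement) =====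
-- stated objective: simpler
-- what changed: Replaces the set comprehension and the three-way if/elif branch over flag pairs by a list of missing-camera adjectives joined with ' и ' plus a suffix chosen by the list's length.
import Mathlib
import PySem

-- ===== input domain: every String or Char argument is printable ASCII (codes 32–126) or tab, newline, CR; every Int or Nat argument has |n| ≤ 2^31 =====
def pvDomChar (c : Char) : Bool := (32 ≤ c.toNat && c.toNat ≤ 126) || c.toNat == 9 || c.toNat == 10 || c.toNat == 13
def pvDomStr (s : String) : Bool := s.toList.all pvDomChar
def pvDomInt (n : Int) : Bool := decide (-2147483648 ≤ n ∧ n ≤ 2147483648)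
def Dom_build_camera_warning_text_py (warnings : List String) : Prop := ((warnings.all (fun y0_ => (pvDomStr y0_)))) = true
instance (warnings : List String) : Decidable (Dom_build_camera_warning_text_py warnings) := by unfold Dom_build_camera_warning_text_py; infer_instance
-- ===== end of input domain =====

-- B builds the warning from a joined list of missing-camera names instead of a three-way branch; objective: simpler.


-- ===== PORT A =====
-- str(x) on a str is the identity, so the set comprehension is set(warnings)
def build_camera_warning_text_py (warnings : List String) : String :=
  let keys : PySem.Set String := PySem.Set.ofList (warnings.map (fun x => x))
  let missing_visible := PySem.Set.contains keys "video_visible_not_ready"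
  let missing_thermal := PySem.Set.contains keys "video_thermal_not_ready"
  if !missing_visible && !missing_thermal then ""
  else
    let cams :=
      if missing_visible && missing_thermal then "видимая и тепловая камеры не подключены"
      else if missing_visible then "видимая камера не подключена"
      else "тепловая камера не подключена"
    "Внимание: " ++ cams ++ ".\n" ++ "Испытание можно выполнить, но результаты будут без видео."

-- ===== PORT B =====
def build_camera_warning_text_py_alt (warnings : List String) : String :=
  let keys := warnings.map (fun x => x)
  let names : List String :=
    (if keys.contains "video_visible_not_ready" then ["видимая"] else []) ++
    (if keys.contains "video_thermal_not_ready" then ["тепловая"] else [])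
  if names.isEmpty then ""
  else
    let suffix := if names.length == 1 then " камера не подключена" else " камеры не подключены"
    let cams := String.intercalate " и " names ++ suffix
    "Внимание: " ++ cams ++ ".\n" ++ "Испытание можно выполнить, но результаты будут без видео."

-- ===== PRECONDITION & SPEC =====
def Spec_build_camera_warning_text_py (warnings : List String) (out : String) : Prop := out = build_camera_warning_text_py_alt warnings
instance (warnings : List String) (out : String) : Decidable (Spec_build_camera_warning_text_py warnings out) := by unfold Spec_build_camera_warning_text_py; infer_instance

-- ===== CLAIM (what is proved, stated in full; the proofs are below) =====
def Claim_equal_build_camera_warning_text_py : Prop := ∀ (warnings : List String), Dom_build_camera_warning_text_py warnings → Spec_build_camera_warning_text_py warnings (build_camera_warning_text_py warnings)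

-- ===== LEMMAS AND PROOFS =====


-- ===== VERDICT (by name: the statement is the Claim_ definition above) =====
set_option maxRecDepth 8000 in
theorem build_camera_warning_text_py_spec : Claim_equal_build_camera_warning_text_py := by
  intro warnings _
  unfold Spec_build_camera_warning_text_py build_camera_warning_text_py build_camera_warning_text_py_alt
  by_cases hv : "video_visible_not_ready" ∈ warnings <;>
  by_cases ht : "video_thermal_not_ready" ∈ warnings <;>
    simp [hv, ht] <;> rfl
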